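-- pv_equiv track=rewrite | github.com/Javert5555/cyclic_codes | cyclic-codes.py | get_error_vectors
-- ===== SOURCE A (Python) =====
-- from copy import deepcopy
--
-- def get_error_vectors(n):
--     error_vectors = []
--     # количество вектор ошибок равно количеству строк транспонированной проверочной матрицы
--     for i in range(n):
--         error_vector = []
--         for j in range(n):
--             error_vector.append(0)
--         error_vector[i] = 1
--         # т.к. единицы идут справа-налево по диагонали
--         # error_vector.reverse()
--         error_vectors.append(error_vector)
--     # вектора для декодирования двух ошибок, например:
--     # 110000
--     # 101000
--     # 100100
--     # ...
--     error_vectors2 = []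
--
--     for i in range(len(error_vectors)):
--         for j in range(i+1, len(error_vectors)):
--             error_vector = deepcopy(error_vectors[i])
--             error_vector[j] = 1
--             error_vectors2.append(error_vector)
--
--     for el in error_vectors2:
--         error_vectors.append(el)
--
--     return(error_vectors)
-- ===== SOURCE B (Python) =====
-- def _units(m):
--     # all length-m 0/1 vectors with a single 1, by structural recursion:
--     # the vector with the 1 in front, then every shorter unit vector shifted right
--     if m <= 0:
--         return []
--     return [[1] + [0] * (m - 1)] + [[0] + u for u in _units(m - 1)]
--
--
-- def _pairs(m):
--     # all length-m 0/1 vectors with exactly two 1s, last-first lexicographic: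
--     # those whose first 1 is in front, then every shorter pair vector shifted right
--     if m <= 0:
--         return []
--     return [[1] + u for u in _units(m - 1)] + [[0] + p for p in _pairs(m - 1)]
--
--
-- def get_error_vectors(n):
--     return _units(n) + _pairs(n)
-- ===== Notes on version B (the rewrite author's own statement) =====
-- stated objective: alternative
-- what changed: Replaces A's nested index loops with deepcopy-and-mutate row patching by a pure structural recursion on n: unit and pair vectors are built by prepending a leading 1 and shifting the recursively obtained shorter vectors right, with no index arithmetic or mutation.
import Mathlib
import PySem

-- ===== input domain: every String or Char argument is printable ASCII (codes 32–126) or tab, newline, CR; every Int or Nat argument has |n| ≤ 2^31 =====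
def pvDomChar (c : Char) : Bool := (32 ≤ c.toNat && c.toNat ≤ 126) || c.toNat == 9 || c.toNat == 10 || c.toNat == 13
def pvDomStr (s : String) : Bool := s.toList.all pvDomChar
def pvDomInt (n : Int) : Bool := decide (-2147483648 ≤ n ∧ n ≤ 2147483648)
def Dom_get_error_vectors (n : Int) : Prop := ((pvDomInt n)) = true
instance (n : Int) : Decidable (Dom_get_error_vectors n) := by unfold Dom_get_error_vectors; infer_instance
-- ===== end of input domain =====

-- B replaces A's loop-and-mutate construction (build unit rows, deepcopy and patch them
-- for pairs) by a pure structural recursion on n: prepend the vectors whose first 1 is in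
-- front, then shift the shorter recursively built vectors right (objective: alternative).

-- ===== PORT A =====
def get_error_vectors (n : Int) : List (List Int) :=
  -- for i in range(n): build zero row, set position i to 1, append
  let error_vectors := (PySem.List.pyRange 0 n 1).foldl (fun evs i =>
      let ev0 := (PySem.List.pyRange 0 n 1).foldl (fun v _ => v ++ [(0 : Int)]) []
      let ev1 := PySem.List.pySetD ev0 i 1        -- error_vector[i] = 1 (i in range, exact)
      evs ++ [ev1]) []
  -- for i in range(len(error_vectors)): for j in range(i+1, len(error_vectors)): copy row i, set j, append
  let error_vectors2 := (PySem.List.pyRange 0 (error_vectors.length : Int) 1).foldl (fun evs2 i =>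
      (PySem.List.pyRange (i + 1) (error_vectors.length : Int) 1).foldl (fun evs2 j =>
        let ev := PySem.List.pyGetD error_vectors i []   -- deepcopy(error_vectors[i]) (i in range, exact)
        let ev := PySem.List.pySetD ev j 1               -- error_vector[j] = 1
        evs2 ++ [ev]) evs2) []
  -- for el in error_vectors2: error_vectors.append(el)
  error_vectors2.foldl (fun evs el => evs ++ [el]) error_vectors

-- ===== PORT B =====
-- _units(m): the unit vector with its 1 in front, then every shorter unit vector shifted right
def pvUnits : Nat → List (List Int)
  | 0 => []
  | m + 1 => ([1] ++ List.replicate m (0 : Int)) :: (pvUnits m).map (fun u => [0] ++ u)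

-- _pairs(m): the pair vectors whose first 1 is in front, then every shorter pair vector shifted right
def pvPairs : Nat → List (List Int)
  | 0 => []
  | m + 1 => (pvUnits m).map (fun u => [1] ++ u) ++ (pvPairs m).map (fun p => [0] ++ p)

def get_error_vectors_alt (n : Int) : List (List Int) :=
  -- the Python guard 'if m <= 0: return []' is the Nat base case: recursion is on n.toNat
  pvUnits n.toNat ++ pvPairs n.toNat

-- ===== PRECONDITION & SPEC =====
def Spec_get_error_vectors (n : Int) (out : List (List Int)) : Prop := out = get_error_vectors_alt n
instance (n : Int) (out : List (List Int)) : Decidable (Spec_get_error_vectors n out) := by unfold Spec_get_error_vectors; infer_instance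

-- ===== CLAIM (what is proved, stated in full; the proofs are below) =====
def Claim_equal_get_error_vectors : Prop := ∀ (n : Int), Dom_get_error_vectors n → Spec_get_error_vectors n (get_error_vectors n)

-- ===== LEMMAS AND PROOFS =====

-- common intermediate form: the indicator rows of all singleton and pair supports
def pvIndic (n : Int) : List (List Int) :=
  (((PySem.List.pyRange 0 n 1).map (fun i => [i]))
      ++ ((PySem.List.pyRange 0 n 1).flatMap (fun i =>
            (PySem.List.pyRange (i + 1) n 1).map (fun j => [i, j])))).map
    (fun s => (PySem.List.pyRange 0 n 1).map (fun k => if k ∈ s then (1 : Int) else 0))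

-- setting position i of the zero row = the indicator vector of the singleton support [i]
lemma set_one_eq_indicator (n i : Int) (hi : 0 ≤ i) (_hin : i < n) :
    PySem.List.pySetD ((PySem.List.pyRange 0 n 1).map (fun _ => (0 : Int))) i 1
      = (PySem.List.pyRange 0 n 1).map (fun k => if k ∈ [i] then (1 : Int) else 0) := by
  rw [PySem.List.pySetD_of_nonneg _ _ hi]
  apply List.ext_getElem
  · simp [PySem.List.length_pyRange_one]
  · intro m h1 h2
    simp only [List.getElem_set, List.getElem_map, PySem.List.getElem_pyRange_one,
      List.mem_singleton]
    simp only [List.length_set, List.length_map, PySem.List.length_pyRange_one] at h1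
    split_ifs <;> omega

-- setting positions i then j of the zero row = the indicator vector of the pair support [i, j]
lemma set_two_eq_indicator (n i j : Int) (hi : 0 ≤ i) (_hij : i < j) (_hjn : j < n) :
    PySem.List.pySetD
        (PySem.List.pySetD ((PySem.List.pyRange 0 n 1).map (fun _ => (0 : Int))) i 1) j 1
      = (PySem.List.pyRange 0 n 1).map (fun k => if k ∈ [i, j] then (1 : Int) else 0) := by
  rw [PySem.List.pySetD_of_nonneg _ _ hi, PySem.List.pySetD_of_nonneg _ _ (by omega)]
  apply List.ext_getElem
  · simp [PySem.List.length_pyRange_one]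
  · intro m h1 h2
    simp only [List.getElem_set, List.getElem_map, PySem.List.getElem_pyRange_one,
      List.mem_cons, List.not_mem_nil, or_false]
    simp only [List.length_set, List.length_map, PySem.List.length_pyRange_one] at h1
    split_ifs <;> omega

-- congruence for flatMap over the same index list
lemma flatMap_congr_mem {α β : Type} {l : List α} {f g : α → List β}
    (h : ∀ x ∈ l, f x = g x) : l.flatMap f = l.flatMap g := by
  induction l with
  | nil => rfl
  | cons a t ih =>
    simp only [List.flatMap_cons, h a (List.mem_cons_self), ih (fun x hx => h x (List.mem_cons_of_mem a hx))]

-- A's loops compute exactly the indicator rows of the singleton and pair supports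
lemma a_eq_indic (n : Int) : get_error_vectors n = pvIndic n := by
  unfold get_error_vectors pvIndic
  by_cases hn : n ≤ 0
  · simp [PySem.List.pyRange_one_eq_nil (by omega : n ≤ (0:Int)),
      PySem.List.pyRange_one_eq_nil (le_refl (0:Int))]
  · rw [Int.not_le] at hn
    simp only [PySem.List.foldl_append_singleton_eq_map, List.nil_append,
      List.map_id', List.length_map,
      PySem.List.length_pyRange_one, Int.sub_zero,
      Int.toNat_of_nonneg (le_of_lt hn)]
    rw [PySem.List.foldl_append_eq_flatMap, List.nil_append, List.map_append, List.map_flatMap]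
    congr 1
    · rw [List.map_map]
      apply List.map_congr_left
      intro i hi
      rw [PySem.List.mem_pyRange_one] at hi
      exact set_one_eq_indicator n i hi.1 hi.2
    · apply flatMap_congr_mem
      intro i hi
      rw [PySem.List.mem_pyRange_one] at hi
      rw [List.map_map]
      apply List.map_congr_left
      intro j hj
      rw [PySem.List.mem_pyRange_one] at hj
      rw [PySem.List.pyGetD_map_pyRange_of_nonneg _ _ _ _ hi.1 hi.2]
      exact set_two_eq_indicator n i j hi.1 (by omega) hj.2

-- zero tail rows produced by the shift
lemma map_zero_row (N : Nat) (f : Nat → Int) (hf : ∀ k, f (k + 1) = 0) :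
    (List.range N).map (f ∘ Nat.succ) = List.replicate N (0 : Int) := by
  have h : (f ∘ Nat.succ) = (fun _ => (0 : Int)) := funext (fun k => hf k)
  rw [h, List.map_const', List.length_range]

-- the recursive units equal the indicator rows of the singleton supports
lemma pvUnits_eq (N : Nat) :
    pvUnits N = (List.range N).map (fun i =>
      (List.range N).map (fun k => if k = i then (1 : Int) else 0)) := by
  induction N with
  | zero => rfl
  | succ N ih =>
    rw [pvUnits, ih, List.range_succ_eq_map, List.map_cons, List.map_cons, List.map_map,
      List.map_map, List.map_map]
    simp only [List.singleton_append, List.cons.injEq]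
    refine ⟨?_, ?_⟩
    · exact ⟨by simp, (map_zero_row N _ (fun k => by simp)).symm⟩
    · apply List.map_congr_left
      intro i _
      simp only [Function.comp, List.map_cons, List.cons.injEq]
      refine ⟨by simp, ?_⟩
      rw [List.map_map]
      apply List.map_congr_left; intro k _
      simp only [Function.comp, Nat.succ_eq_add_one]
      rw [if_congr (by omega : (k + 1 = i + 1) ↔ (k = i)) rfl rfl]

-- the recursive pairs equal the indicator rows of the pair supports (i, i+1+d)
lemma pvPairs_eq (N : Nat) :
    pvPairs N = (List.range N).flatMap (fun i =>
      (List.range (N - (i + 1))).map (fun d =>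
        (List.range N).map (fun k => if k = i ∨ k = i + 1 + d then (1 : Int) else 0))) := by
  induction N with
  | zero => rfl
  | succ N ih =>
    rw [pvPairs, ih, pvUnits_eq, List.range_succ_eq_map (n := N), List.flatMap_cons,
      List.flatMap_map, List.map_flatMap]
    congr 1
    · simp only [List.map_map, Nat.add_sub_cancel]
      apply List.map_congr_left
      intro d _
      simp only [Function.comp, List.map_cons, List.singleton_append, List.cons.injEq]
      refine ⟨by simp, ?_⟩
      rw [List.map_map]
      apply List.map_congr_left; intro k _
      simp only [Function.comp, Nat.succ_eq_add_one]
      rw [if_congr (by omega : (k + 1 = 0 ∨ k + 1 = 0 + 1 + d) ↔ (k = d)) rfl rfl]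
    · apply flatMap_congr_mem
      intro i _
      simp only [List.map_map]
      have hsub : N + 1 - (i + 1 + 1) = N - (i + 1) := by omega
      rw [hsub]
      apply List.map_congr_left
      intro d _
      simp only [Function.comp, List.map_cons, List.singleton_append, List.cons.injEq]
      refine ⟨by rw [if_neg (by omega : ¬ (0 = i + 1 ∨ 0 = i + 1 + 1 + d))], ?_⟩
      rw [List.map_map]
      apply List.map_congr_left; intro k _
      simp only [Function.comp, Nat.succ_eq_add_one]
      rw [if_congr (by omega : (k + 1 = i + 1 ∨ k + 1 = i + 1 + 1 + d) ↔ (k = i ∨ k = i + 1 + d)) rfl rfl]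

-- the indicator form equals B's recursion
lemma indic_eq_alt (n : Int) : pvIndic n = get_error_vectors_alt n := by
  unfold get_error_vectors_alt
  unfold pvIndic
  rw [List.map_append, List.map_flatMap, pvUnits_eq, pvPairs_eq]
  have hrange : PySem.List.pyRange 0 n 1 = (List.range n.toNat).map (fun k : Nat => (k : Int)) := by
    rw [PySem.List.pyRange_one]
    rw [show n - 0 = n from by ring]
    exact List.map_congr_left (fun k _ => by omega)
  congr 1
  · -- singleton rows
    rw [hrange, List.map_map, List.map_map]
    apply List.map_congr_left
    intro i _
    simp only [Function.comp_def, List.map_map]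
    apply List.map_congr_left
    intro k _
    rw [if_congr (by simp : ((k : Int) ∈ [(i : Int)]) ↔ (k = i)) rfl rfl]
  · -- pair rows
    rw [hrange, List.flatMap_map]
    apply flatMap_congr_mem
    intro i hi
    rw [List.mem_range] at hi
    have hinner : PySem.List.pyRange ((i : Int) + 1) n 1
        = (List.range (n.toNat - (i + 1))).map (fun d : Nat => ((i : Int) + 1 + (d : Int))) := by
      rw [PySem.List.pyRange_one]
      have h2 : (n - ((i : Int) + 1)).toNat = n.toNat - (i + 1) := by omega
      rw [h2]
    rw [hinner, List.map_map, List.map_map]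
    apply List.map_congr_left
    intro d _
    simp only [Function.comp_def, List.map_map]
    apply List.map_congr_left
    intro k _
    have h : ((k : Int) ∈ [(i : Int), (i : Int) + 1 + (d : Int)]) ↔ (k = i ∨ k = i + 1 + d) := by
      simp only [List.mem_cons, List.not_mem_nil, or_false]
      omega
    rw [if_congr h rfl rfl]

-- ===== VERDICT (by name: the statement is the Claim_ definition above) =====
theorem get_error_vectors_spec : Claim_equal_get_error_vectors := by
  intro n _
  unfold Spec_get_error_vectors
  rw [a_eq_indic, indic_eq_alt]
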